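-- pv_equiv track=rewrite | github.com/s16173760/m_flow | coreference/english_coreference/coreference.py | _quote_spans
-- ===== SOURCE A (Python) =====
-- from typing import Dict, List, Optional, Tuple
--
-- def _quote_spans(sent: str) -> List[Tuple[int, int]]:
--     spans: List[Tuple[int, int]] = []
--     idx = 0
--     while idx < len(sent):
--         start = sent.find('"', idx)
--         if start == -1:
--             break
--         end = sent.find('"', start + 1)
--         if end == -1:
--             break
--         spans.append((start + 1, end))
--         idx = end + 1
--     return spans
-- ===== SOURCE B (Python) =====
-- from typing import List, Tuple
--
-- def _quote_spans(sent: str) -> List[Tuple[int, int]]: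
--     positions = [i for i, ch in enumerate(sent) if ch == '"']
--     spans: List[Tuple[int, int]] = []
--     for k in range(0, len(positions) - 1, 2):
--         spans.append((positions[k] + 1, positions[k + 1]))
--     return spans
-- ===== Notes on version B (the rewrite author's own statement) =====
-- stated objective: alternative
-- what changed: Replaces A's interleaved find/cursor while-loop with a gather-then-pair decomposition: one enumerate pass collects all quote indices, then a stride-2 loop pairs consecutive indices (dropping a trailing unpaired quote).
import Mathlib
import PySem

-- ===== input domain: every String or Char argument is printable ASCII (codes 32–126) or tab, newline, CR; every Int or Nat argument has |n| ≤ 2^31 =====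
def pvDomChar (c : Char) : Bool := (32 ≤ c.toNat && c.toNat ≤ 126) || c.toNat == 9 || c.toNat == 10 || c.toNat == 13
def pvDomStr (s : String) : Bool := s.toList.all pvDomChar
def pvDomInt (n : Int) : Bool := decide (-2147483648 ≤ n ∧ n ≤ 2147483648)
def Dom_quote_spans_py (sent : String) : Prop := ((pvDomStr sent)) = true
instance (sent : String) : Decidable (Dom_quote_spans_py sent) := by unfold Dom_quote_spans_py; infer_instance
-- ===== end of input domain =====

-- B replaces A's find/cursor while-loop by gather-all-quote-indices then pair-by-stride-2; same O(n) cost, different decomposition.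

-- ===== PORT A =====
-- the while loop, as fuel recursion on the same state (idx, spans); fuel s.length + 1 suffices because idx grows by ≥ 2 each turn
def quoteLoopA (s : List Char) : Nat → Int → List (Int × Int) → List (Int × Int)
  | 0, _, spans => spans
  | fuel + 1, idx, spans =>
    if idx < (s.length : Int) then
      let start := PySem.Chars.findFrom s ['"'] idx
      if start = -1 then spans
      else
        let e := PySem.Chars.findFrom s ['"'] (start + 1)
        if e = -1 then spans
        else quoteLoopA s fuel (e + 1) (spans ++ [(start + 1, e)])
    else spans

def quote_spans_py (sent : String) : List (Int × Int) :=
  quoteLoopA sent.toList (sent.toList.length + 1) 0 []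

-- ===== PORT B =====
def quote_spans_py_alt (sent : String) : List (Int × Int) :=
  let positions : List Int :=
    ((PySem.List.enumerate sent.toList 0).filter (fun p => p.2 == '"')).map (·.1)
  (PySem.List.pyRange 0 ((positions.length : Int) - 1) 2).foldl
    (fun acc k =>
      acc ++ [(PySem.List.pyGetD positions k 0 + 1, PySem.List.pyGetD positions (k + 1) 0)]) []

-- ===== PRECONDITION & SPEC =====
def Spec_quote_spans_py (sent : String) (out : List (Int × Int)) : Prop := out = quote_spans_py_alt sent
instance (sent : String) (out : List (Int × Int)) : Decidable (Spec_quote_spans_py sent out) := by unfold Spec_quote_spans_py; infer_instance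

-- ===== CLAIM (what is proved, stated in full; the proofs are below) =====
def Claim_equal_quote_spans_py : Prop := ∀ (sent : String), Dom_quote_spans_py sent → Spec_quote_spans_py sent (quote_spans_py sent)

-- ===== LEMMAS AND PROOFS =====

-- the indices (offset by k) of the occurrences of c in s
def posOf (c : Char) : List Char → Int → List Int
  | [], _ => []
  | x :: xs, k => if x = c then k :: posOf c xs (k + 1) else posOf c xs (k + 1)

-- consecutive pairing with +1 on the open index; the common shape both programs compute
def chunkPairs : List Int → List (Int × Int)
  | a :: b :: rest => (a + 1, b) :: chunkPairs rest
  | _ => []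

theorem mem_posOf {c : Char} {s : List Char} {k p : Int} :
    p ∈ posOf c s k ↔ ∃ i : Nat, p = k + i ∧ s[i]? = some c := by
  induction s generalizing k with
  | nil => simp [posOf]
  | cons x xs ih =>
    simp only [posOf]
    constructor
    · intro h
      split at h
      · rcases List.mem_cons.mp h with h | h
        · exact ⟨0, by simpa using h, by simp [*]⟩
        · obtain ⟨i, hi, hg⟩ := ih.mp h
          exact ⟨i + 1, by push_cast; omega, by simpa using hg⟩
      · obtain ⟨i, hi, hg⟩ := ih.mp h
        exact ⟨i + 1, by push_cast; omega, by simpa using hg⟩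
    · rintro ⟨i, hp, hg⟩
      cases i with
      | zero =>
        simp only [List.getElem?_cons_zero, Option.some.injEq] at hg
        subst hg
        simp [hp]
      | succ i =>
        simp only [List.getElem?_cons_succ] at hg
        have : p ∈ posOf c xs (k + 1) := ih.mpr ⟨i, by push_cast at hp ⊢; omega, hg⟩
        split <;> simp [this]

theorem le_of_mem_posOf {c : Char} {s : List Char} {k p : Int} (h : p ∈ posOf c s k) : k ≤ p := by
  obtain ⟨i, hi, -⟩ := mem_posOf.mp h
  omega

theorem pairwise_posOf (c : Char) (s : List Char) (k : Int) : (posOf c s k).Pairwise (· < ·) := by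
  induction s generalizing k with
  | nil => simp [posOf]
  | cons x xs ih =>
    have hlb : ∀ p ∈ posOf c xs (k + 1), k < p := fun p hp => by
      have := le_of_mem_posOf hp; omega
    simp only [posOf]
    split
    · exact List.Pairwise.cons hlb (ih (k + 1))
    · exact ih (k + 1)

theorem length_posOf_le (c : Char) (s : List Char) (k : Int) : (posOf c s k).length ≤ s.length := by
  induction s generalizing k with
  | nil => simp [posOf]
  | cons x xs ih =>
    simp only [posOf]
    split
    · simpa using ih (k + 1)
    · have := ih (k + 1); simp; omega

theorem posOf_append (c : Char) (a b : List Char) (k : Int) :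
    posOf c (a ++ b) k = posOf c a k ++ posOf c b (k + a.length) := by
  induction a generalizing k with
  | nil => simp [posOf]
  | cons x xs ih =>
    simp only [List.cons_append, posOf, ih (k + 1), List.length_cons]
    have : k + 1 + (xs.length : Int) = k + ((xs.length : Int) + 1) := by ring
    rw [this]
    split <;> simp

theorem posOf_eq_map (c : Char) (s : List Char) (k : Int) :
    posOf c s k = (posOf c s 0).map (· + k) := by
  induction s generalizing k with
  | nil => simp [posOf]
  | cons x xs ih =>
    simp only [posOf]
    rw [ih (k + 1), ih (0 + 1)]
    have hm : List.map (fun x => x + (k + 1)) (posOf c xs 0)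
        = List.map ((fun x => x + k) ∘ fun x => x + 1) (posOf c xs 0) := by
      apply List.map_congr_left; intro a _; simp [Function.comp]; ring
    split
    · simp only [List.map_cons, List.map_map, zero_add]
      rw [hm]
    · simp only [List.map_map, zero_add]
      rw [hm]

theorem singleton_prefix_iff {c : Char} {t : List Char} : [c] <+: t ↔ t.head? = some c := by
  cases t with
  | nil => simp
  | cons x xs => simp [List.cons_prefix_cons, eq_comm]

theorem find_single (c : Char) (s : List Char) :
    PySem.Chars.find s [c] = (posOf c s 0).headD (-1) := by
  have hdrop : ∀ i : Nat, [c] <+: s.drop i ↔ s[i]? = some c := by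
    intro i; rw [singleton_prefix_iff, List.head?_drop]
  cases hpos : posOf c s 0 with
  | nil =>
    rw [(PySem.Chars.find_eq_neg_one_iff s [c]).mpr]
    · rfl
    · intro hinf
      obtain ⟨i, hi⟩ := ((PySem.Chars.exists_prefix_drop_iff_isIn [c] s).mpr
        ((PySem.Chars.isIn_iff_infix [c] s).mpr hinf))
      have : (i : Int) ∈ posOf c s 0 := mem_posOf.mpr ⟨i, by omega, (hdrop i).mp hi⟩
      rw [hpos] at this; exact absurd this (List.not_mem_nil)
  | cons p rest =>
    have hpmem : p ∈ posOf c s 0 := by rw [hpos]; exact List.mem_cons_self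
    obtain ⟨i, hpi, hgi⟩ := mem_posOf.mp hpmem
    have hinf : [c] <:+: s := by
      rw [← PySem.Chars.isIn_iff_infix, ← PySem.Chars.exists_prefix_drop_iff_isIn]
      exact ⟨i, (hdrop i).mpr hgi⟩
    have h0 : 0 ≤ PySem.Chars.find s [c] := (PySem.Chars.find_nonneg_iff s [c]).mpr hinf
    obtain ⟨hpre, hmin⟩ := PySem.Chars.find_spec h0
    set f := (PySem.Chars.find s [c]).toNat with hf
    have hfmem : (f : Int) ∈ posOf c s 0 := mem_posOf.mpr ⟨f, by omega, (hdrop f).mp hpre⟩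
    have hple : p ≤ (f : Int) := by
      rw [hpos] at hfmem
      rcases List.mem_cons.mp hfmem with h | h
      · omega
      · have := (List.pairwise_cons.mp (hpos ▸ pairwise_posOf c s 0)).1 _ h
        omega
    have hfle : f ≤ i := by
      by_contra hc
      exact hmin i (by omega) ((hdrop i).mpr hgi)
    have : PySem.Chars.find s [c] = (f : Int) := by omega
    rw [this]; simp only [List.headD_cons]; omega

theorem findFrom_single (c : Char) (s : List Char) (j : Nat) (hj : j ≤ s.length) :
    PySem.Chars.findFrom s [c] (j : Int) =
      ((posOf c s 0).filter (fun p => decide ((j : Int) ≤ p))).headD (-1) := by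
  rw [PySem.Chars.findFrom_natCast s [c] j hj]
  have hsplit : posOf c s 0 = posOf c (s.take j) 0 ++ posOf c (s.drop j) (j : Int) := by
    have := posOf_append c (s.take j) (s.drop j) 0
    rw [List.take_append_drop] at this
    rw [this, List.length_take]
    congr 2
    omega
  have hfil : (posOf c s 0).filter (fun p => decide ((j : Int) ≤ p))
      = posOf c (s.drop j) (j : Int) := by
    rw [hsplit, List.filter_append]
    rw [List.filter_eq_nil_iff.mpr, List.filter_eq_self.mpr]
    · simp
    · intro p hp; simpa using le_of_mem_posOf hp
    · intro p hp
      obtain ⟨i, hpi, hgi⟩ := mem_posOf.mp hp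
      have : i < (s.take j).length := (List.getElem?_eq_some_iff.mp hgi).1
      simp only [List.length_take] at this
      simp; omega
  rw [hfil, posOf_eq_map, find_single]
  rcases hE : posOf c (s.drop j) 0 with _ | ⟨q, t⟩
  · simp
  · have hq : 0 ≤ q := le_of_mem_posOf (show q ∈ posOf c (s.drop j) 0 by
      rw [hE]; exact List.mem_cons_self)
    simp only [List.map_cons, List.headD_cons]
    rw [if_neg (by omega)]
    ring

theorem filter_tail {L : List Int} (hL : L.Pairwise (· < ·)) {j p : Int} {rest : List Int}
    (h : L.filter (fun x => decide (j ≤ x)) = p :: rest) :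
    L.filter (fun x => decide (p + 1 ≤ x)) = rest := by
  induction L generalizing rest with
  | nil => simp at h
  | cons x xs ih =>
    obtain ⟨hx, hxs⟩ := List.pairwise_cons.mp hL
    by_cases hjx : j ≤ x
    · rw [List.filter_cons_of_pos (by simpa using hjx)] at h
      injection h with h1 h2
      subst h1
      rw [List.filter_eq_self.mpr (fun y hy => by have := hx y hy; simp; omega)] at h2
      rw [List.filter_cons_of_neg (by simp only [decide_eq_true_eq]; omega)]
      rw [List.filter_eq_self.mpr (fun y hy => by have := hx y hy; simp; omega)]
      exact h2
    · rw [List.filter_cons_of_neg (by simpa using hjx)] at h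
      have hpx : x < p := hx p (List.mem_of_mem_filter (h ▸ List.mem_cons_self))
      rw [List.filter_cons_of_neg (by simp only [decide_eq_true_eq]; omega)]
      exact ih hxs h

theorem chunkPairs_short {L : List Int} (h : L.length ≤ 1) : chunkPairs L = [] := by
  match L, h with
  | [], _ => rfl
  | [a], _ => rfl

theorem loopA_eq (s : List Char) (fuel : Nat) :
    ∀ (j : Nat), j ≤ s.length → ∀ (acc : List (Int × Int)),
    ((posOf '"' s 0).filter (fun p => decide ((j : Int) ≤ p))).length ≤ 2 * fuel →
    quoteLoopA s fuel (j : Int) acc =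
      acc ++ chunkPairs ((posOf '"' s 0).filter (fun p => decide ((j : Int) ≤ p))) := by
  induction fuel with
  | zero =>
    intro j hj acc hfuel
    have hnil : (posOf '"' s 0).filter (fun p => decide ((j : Int) ≤ p)) = [] :=
      List.eq_nil_of_length_eq_zero (by omega)
    rw [hnil]
    simp [quoteLoopA, chunkPairs]
  | succ fuel ih =>
    intro j hj acc hfuel
    simp only [quoteLoopA]
    by_cases hjlen : (j : Int) < (s.length : Int)
    · rw [if_pos hjlen, findFrom_single '"' s j hj]
      rcases hfil : (posOf '"' s 0).filter (fun p => decide ((j : Int) ≤ p)) with _ | ⟨p, rest⟩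
      · simp [chunkPairs]
      · have hpmem : p ∈ (posOf '"' s 0).filter (fun x => decide ((j : Int) ≤ x)) := by
          rw [hfil]; exact List.mem_cons_self
        obtain ⟨i, hpi, hgi⟩ := mem_posOf.mp (List.mem_of_mem_filter hpmem)
        have hjp : (j : Int) ≤ p := by simpa using (List.mem_filter.mp hpmem).2
        have hilen : i < s.length := (List.getElem?_eq_some_iff.mp hgi).1
        simp only [List.headD_cons]
        rw [if_neg (by omega)]
        have hcast1 : p + 1 = ((i + 1 : Nat) : Int) := by push_cast; omega
        rw [hcast1, findFrom_single '"' s (i + 1) (by omega)]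
        have hpred : (fun x => decide (((i + 1 : Nat) : Int) ≤ x))
            = (fun x => decide (p + 1 ≤ x)) := by
          funext x; rw [← hcast1]
        rw [hpred]
        have htail : (posOf '"' s 0).filter (fun x => decide (p + 1 ≤ x)) = rest :=
          filter_tail (pairwise_posOf '"' s 0) hfil
        rw [htail]
        rcases hrest : rest with _ | ⟨q, rest2⟩
        · subst hrest
          simp [chunkPairs]
        · subst hrest
          have hqmem : q ∈ (posOf '"' s 0).filter (fun x => decide (p + 1 ≤ x)) := by
            rw [htail]; exact List.mem_cons_self
          obtain ⟨i2, hqi, hg2⟩ := mem_posOf.mp (List.mem_of_mem_filter hqmem)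
          have hpq : p + 1 ≤ q := by simpa using (List.mem_filter.mp hqmem).2
          have hi2len : i2 < s.length := (List.getElem?_eq_some_iff.mp hg2).1
          simp only [List.headD_cons]
          rw [if_neg (by omega)]
          have hcast2 : q + 1 = ((i2 + 1 : Nat) : Int) := by push_cast; omega
          rw [hcast2]
          have hrest2 : (posOf '"' s 0).filter
              (fun x => decide (((i2 + 1 : Nat) : Int) ≤ x)) = rest2 := by
            have hpred2 : (fun x => decide (((i2 + 1 : Nat) : Int) ≤ x))
                = (fun x => decide (q + 1 ≤ x)) := by
              funext x; rw [← hcast2]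
            rw [hpred2]
            exact filter_tail (pairwise_posOf '"' s 0) htail
          have hlen2 : ((posOf '"' s 0).filter
              (fun x => decide (((i2 + 1 : Nat) : Int) ≤ x))).length ≤ 2 * fuel := by
            rw [hrest2]
            have := congrArg List.length hfil
            simp at this
            omega
          rw [ih (i2 + 1) (by omega) _ hlen2, hrest2]
          simp [chunkPairs]
          omega
    · rw [if_neg hjlen]
      have hnil : (posOf '"' s 0).filter (fun p => decide ((j : Int) ≤ p)) = [] := by
        apply List.filter_eq_nil_iff.mpr
        intro p hp
        obtain ⟨i, hpi, hgi⟩ := mem_posOf.mp hp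
        have : i < s.length := (List.getElem?_eq_some_iff.mp hgi).1
        simp
        omega
      rw [hnil]
      simp [chunkPairs]

theorem pyRange_two_nil {a b : Int} (h : b ≤ a) : PySem.List.pyRange a b 2 = [] := by
  rw [PySem.List.pyRange_of_pos a b (by norm_num), if_neg (by omega)]
  simp

theorem pyRange_two_cons {a b : Int} (h : a < b) :
    PySem.List.pyRange a b 2 = a :: PySem.List.pyRange (a + 2) b 2 := by
  rw [PySem.List.pyRange_of_pos a b (by norm_num),
      PySem.List.pyRange_of_pos (a + 2) b (by norm_num),
      if_pos h]
  have hn : ((b - a + 2 - 1) / 2).toNat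
      = (if a + 2 < b then ((b - (a + 2) + 2 - 1) / 2).toNat else 0) + 1 := by
    split <;> omega
  rw [hn, List.range_succ_eq_map]
  simp only [List.map_cons, List.map_map, Nat.cast_zero, mul_zero, add_zero]
  congr 1
  apply List.map_congr_left
  intro k _
  simp [Function.comp]
  ring

theorem foldB_aux (P : List Int) (j : Nat) (acc : List (Int × Int)) :
    (PySem.List.pyRange (j : Int) ((P.length : Int) - 1) 2).foldl
      (fun acc k =>
        acc ++ [(PySem.List.pyGetD P k 0 + 1, PySem.List.pyGetD P (k + 1) 0)]) acc
    = acc ++ chunkPairs (P.drop j) := by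
  by_cases h : (P.length : Int) - 1 ≤ (j : Int)
  · rw [pyRange_two_nil h, chunkPairs_short (by simp; omega)]
    simp
  · have hj1 : j + 1 < P.length := by omega
    rw [pyRange_two_cons (by omega), List.foldl_cons]
    have hcast : ((j : Int) + 2) = ((j + 2 : Nat) : Int) := by push_cast; ring
    rw [hcast, foldB_aux P (j + 2)]
    rw [PySem.List.pyGetD_eq_getElem P 0 (by omega) (by push_cast; omega)]
    have hcast1 : ((j : Int) + 1) = ((j + 1 : Nat) : Int) := by push_cast; ring
    rw [hcast1, PySem.List.pyGetD_eq_getElem P 0 (by omega) (by omega)]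
    rw [List.drop_eq_getElem_cons (show j < P.length by omega),
        List.drop_eq_getElem_cons hj1]
    simp only [Int.toNat_natCast, chunkPairs, List.append_assoc, List.cons_append,
      List.nil_append]
termination_by P.length - j
decreasing_by omega

theorem enumFilterMap (s : List Char) (k : Int) :
    ((PySem.List.enumerate s k).filter (fun p => p.2 == '"')).map (·.1) = posOf '"' s k := by
  induction s generalizing k with
  | nil => simp [posOf]
  | cons x xs ih =>
    rw [PySem.List.enumerate_cons]
    simp only [List.filter_cons, posOf]
    by_cases hx : x = '"'
    · rw [if_pos (by simpa using hx), if_pos hx]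
      simp only [List.map_cons]
      rw [ih]
    · rw [if_neg (by simpa using hx), if_neg hx]
      exact ih (k + 1)

-- ===== VERDICT (by name: the statement is the Claim_ definition above) =====
theorem quote_spans_py_spec : Claim_equal_quote_spans_py := by
  unfold Claim_equal_quote_spans_py Spec_quote_spans_py
  intro sent _
  unfold quote_spans_py quote_spans_py_alt
  rw [enumFilterMap]
  have hB := foldB_aux (posOf '"' sent.toList 0) 0 []
  simp only [Nat.cast_zero, List.drop_zero, List.nil_append] at hB
  rw [hB]
  have hA := loopA_eq sent.toList (sent.toList.length + 1) 0 (Nat.zero_le _) []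
    (by
      have h1 := length_posOf_le '"' sent.toList 0
      have h2 := List.length_filter_le (fun p : Int => decide (((0 : Nat) : Int) ≤ p))
        (posOf '"' sent.toList 0)
      omega)
  simp only [Nat.cast_zero, List.nil_append] at hA
  rw [hA]
  congr 1
  apply List.filter_eq_self.mpr
  intro p hp
  have := le_of_mem_posOf hp
  simpa using this
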